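-- pv_equiv track=rewrite | github.com/XinchaoWu99/localscribe-macos | src/localscribe/system_audio.py | _summarize_build_failure
-- ===== SOURCE A (Python) =====
-- def _summarize_build_failure(log_output: str) -> str:
--     if not log_output:
--         return "Review the helper build log for details."
--
--     for line in reversed(log_output.splitlines()):
--         text = line.strip()
--         if text:
--             return text
--     return "Review the helper build log for details."
-- ===== SOURCE B (Python) =====
-- def _summarize_build_failure(log_output: str) -> str:
--     last = "Review the helper build log for details."
--     for line in log_output.splitlines():
--         text = line.strip()
--         if text:
--             last = text
--     return last
-- ===== Notes on version B (the rewrite author's own statement) =====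
-- stated objective: simpler
-- what changed: Replaced the backward early-return scan plus a separate empty-string guard with a single forward pass that keeps the last non-empty stripped line in an accumulator initialised to the default message.
import Mathlib
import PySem

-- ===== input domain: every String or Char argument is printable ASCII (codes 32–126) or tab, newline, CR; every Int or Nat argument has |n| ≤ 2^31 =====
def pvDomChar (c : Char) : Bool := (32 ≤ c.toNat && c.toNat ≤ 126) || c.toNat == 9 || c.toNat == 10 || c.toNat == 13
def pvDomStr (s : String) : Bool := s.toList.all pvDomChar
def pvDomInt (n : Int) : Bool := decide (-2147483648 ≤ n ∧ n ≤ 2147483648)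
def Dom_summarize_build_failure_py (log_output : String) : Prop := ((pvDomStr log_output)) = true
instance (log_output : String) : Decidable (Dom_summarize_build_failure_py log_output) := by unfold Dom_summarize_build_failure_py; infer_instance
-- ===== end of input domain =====

-- B replaces A's backward early-return scan (plus empty-string guard) with one forward
-- pass keeping the last non-empty stripped line in an accumulator; simpler decomposition.

-- ===== PORT A =====
-- the reversed for-loop with early return, as structural recursion over the reversed lines
def summarizeALoop : List String → String
  | [] => "Review the helper build log for details."
  | line :: rest =>
    let text := PySem.Str.strip line
    if text ≠ "" then text else summarizeALoop rest

def summarize_build_failure_py (log_output : String) : String :=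
  if log_output = "" then "Review the helper build log for details."
  else summarizeALoop (PySem.Str.splitlines log_output).reverse

-- ===== PORT B =====
-- forward pass, accumulator `last` initialised to the default message
def summarize_build_failure_py_alt (log_output : String) : String :=
  (PySem.Str.splitlines log_output).foldl
    (fun last line =>
      let text := PySem.Str.strip line
      if text ≠ "" then text else last)
    "Review the helper build log for details."

-- ===== PRECONDITION & SPEC =====
def Spec_summarize_build_failure_py (log_output : String) (out : String) : Prop := out = summarize_build_failure_py_alt log_output
instance (log_output : String) (out : String) : Decidable (Spec_summarize_build_failure_py log_output out) := by unfold Spec_summarize_build_failure_py; infer_instance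

-- ===== CLAIM (what is proved, stated in full; the proofs are below) =====
def Claim_equal_summarize_build_failure_py : Prop := ∀ (log_output : String), Dom_summarize_build_failure_py log_output → Spec_summarize_build_failure_py log_output (summarize_build_failure_py log_output)

-- ===== LEMMAS AND PROOFS =====
-- A's loop over ys ++ [x] equals A's loop over ys with the default replaced by f d x
theorem aLoop_snoc (f : String → String → String)
    (hf : f = fun last line =>
      let text := PySem.Str.strip line
      if text ≠ "" then text else last)
    (ys : List String) (x d : String) :
    (ys ++ [x]).foldr (fun line r => let t := PySem.Str.strip line; if t ≠ "" then t else r) d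
      = ys.foldr (fun line r => let t := PySem.Str.strip line; if t ≠ "" then t else r) (f d x) := by
  induction ys with
  | nil => simp [hf]
  | cons y ys ih =>
    simp only [List.cons_append, List.foldr_cons]
    rw [ih]

theorem summarizeALoop_eq_foldr (l : List String) (d : String)
    (hd : d = "Review the helper build log for details.") :
    summarizeALoop l = l.foldr (fun line r => let t := PySem.Str.strip line; if t ≠ "" then t else r) d := by
  induction l with
  | nil => simp [summarizeALoop, hd]
  | cons x xs ih => simp [summarizeALoop, List.foldr, ih]

theorem foldl_eq_rev_foldr (l : List String) (d : String) :
    l.foldl (fun last line => let t := PySem.Str.strip line; if t ≠ "" then t else last) d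
      = l.reverse.foldr (fun line r => let t := PySem.Str.strip line; if t ≠ "" then t else r) d := by
  induction l generalizing d with
  | nil => rfl
  | cons x xs ih =>
    simp only [List.foldl, List.reverse_cons]
    rw [ih, aLoop_snoc (fun last line => let t := PySem.Str.strip line; if t ≠ "" then t else last) rfl]

-- ===== VERDICT (by name: the statement is the Claim_ definition above) =====
theorem summarize_build_failure_py_spec : Claim_equal_summarize_build_failure_py := by
  intro log_output _
  unfold Spec_summarize_build_failure_py summarize_build_failure_py summarize_build_failure_py_alt
  by_cases h : log_output = ""
  · subst h
    decide
  · simp only [h, if_false]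
    rw [summarizeALoop_eq_foldr _ _ rfl, foldl_eq_rev_foldr]
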